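-- pv_equiv track=rewrite | github.com/JohnDMcMaster/cdlv | grbl_snake_fill.py | _line_requires_motion_sync
-- ===== SOURCE A (Python) =====
-- def _line_requires_motion_sync(line: str) -> bool:
--     """True for G0/G00/G1/G01 blocks (motion that should finish before the next command)."""
--     s = line.strip().upper()
--     if not s.startswith("G"):
--         return False
--     i = 1
--     while i < len(s) and s[i].isdigit():
--         i += 1
--     gword = s[:i]
--     return gword in ("G0", "G00", "G1", "G01")
-- ===== SOURCE B (Python) =====
-- def _line_requires_motion_sync(line: str) -> bool:
--     """True for G0/G00/G1/G01 blocks (motion that should finish before the next command)."""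
--     s = line.strip().upper()
--     return any(s.startswith("G" + alt) and not s[len(alt) + 1:len(alt) + 2].isdigit()
--                for alt in ("0", "00", "1", "01"))
-- ===== Notes on version B (the rewrite author's own statement) =====
-- stated objective: idiomatic
-- what changed: Replaces the explicit index loop that scans the digit run after 'G' (then compares the slice against a tuple) by directly testing the four candidate G-words as prefixes with a no-digit-follows check via any().
import Mathlib
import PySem

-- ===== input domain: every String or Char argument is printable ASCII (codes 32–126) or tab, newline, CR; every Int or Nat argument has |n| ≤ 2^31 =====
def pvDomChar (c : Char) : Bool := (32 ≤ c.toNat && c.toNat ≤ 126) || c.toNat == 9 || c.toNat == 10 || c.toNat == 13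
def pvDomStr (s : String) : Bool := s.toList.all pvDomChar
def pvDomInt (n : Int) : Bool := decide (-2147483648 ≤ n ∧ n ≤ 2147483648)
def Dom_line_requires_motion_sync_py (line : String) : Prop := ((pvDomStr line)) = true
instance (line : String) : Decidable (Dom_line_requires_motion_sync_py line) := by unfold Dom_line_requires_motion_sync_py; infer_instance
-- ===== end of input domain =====

-- B replaces A's explicit digit-scan loop by matching the four candidate G-words
-- ("G0"/"G00"/"G1"/"G01") directly with a non-digit-follows check (alternative; no speed claim).

-- ===== PORT A =====
-- the while loop `while i < len(s) and s[i].isdigit(): i += 1` started at i = 1: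
-- it counts the run of digits after the first character
def pvDigitScan : List Char → Nat
  | [] => 0
  | c :: r => if PySem.Chars.isdigit c then pvDigitScan r + 1 else 0

def line_requires_motion_sync_py (line : String) : Bool :=
  let s := (PySem.Str.upper (PySem.Str.strip line)).toList
  if !(PySem.Chars.startswith s ['G']) then false
  else
    let i : Nat := 1 + pvDigitScan s.tail
    let gword : List Char := s.take i          -- s[:i]
    (gword == "G0".toList || gword == "G00".toList ||
     gword == "G1".toList || gword == "G01".toList)

-- ===== PORT B =====
-- one candidate test: s.startswith("G"+alt) and not s[len(alt)+1:len(alt)+2].isdigit()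
def pvAltHit (s : List Char) (alt : List Char) : Bool :=
  PySem.Chars.startswith s ('G' :: alt) &&
  !(PySem.Chars.strIsdigit
      (PySem.List.slice s (some ((alt.length : Int) + 1)) (some ((alt.length : Int) + 2))))

def line_requires_motion_sync_py_alt (line : String) : Bool :=
  let s := (PySem.Str.upper (PySem.Str.strip line)).toList
  [['0'], ['0', '0'], ['1'], ['0', '1']].any (pvAltHit s)

-- ===== PRECONDITION & SPEC =====
def Spec_line_requires_motion_sync_py (line : String) (out : Bool) : Prop := out = line_requires_motion_sync_py_alt line
instance (line : String) (out : Bool) : Decidable (Spec_line_requires_motion_sync_py line out) := by unfold Spec_line_requires_motion_sync_py; infer_instance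

-- ===== CLAIM (what is proved, stated in full; the proofs are below) =====
def Claim_equal_line_requires_motion_sync_py : Prop := ∀ (line : String), Dom_line_requires_motion_sync_py line → Spec_line_requires_motion_sync_py line (line_requires_motion_sync_py line)

-- ===== LEMMAS AND PROOFS =====

-- the scan stops immediately iff the next character is not a digit
lemma pv_stop (r : List Char) :
    (r.take (pvDigitScan r) == ([] : List Char)) = !PySem.Chars.strIsdigit (r.take 1) := by
  rcases r with _ | ⟨b, r⟩
  · simp [pvDigitScan, PySem.Chars.strIsdigit]
  by_cases db : PySem.Chars.isdigit b = true
  · simp [pvDigitScan, db, PySem.Chars.strIsdigit]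
  · simp [pvDigitScan, db, PySem.Chars.strIsdigit]

-- the heart of the equivalence, on the characters after the leading 'G'
lemma pv_inner (r : List Char) :
    (r.take (pvDigitScan r) == ['0'] || r.take (pvDigitScan r) == ['0','0'] ||
     r.take (pvDigitScan r) == ['1'] || r.take (pvDigitScan r) == ['0','1']) =
    (['0'].isPrefixOf r && !PySem.Chars.strIsdigit ((r.drop 1).take 1) ||
     (['0','0'].isPrefixOf r && !PySem.Chars.strIsdigit ((r.drop 2).take 1) ||
      (['1'].isPrefixOf r && !PySem.Chars.strIsdigit ((r.drop 1).take 1) ||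
       ['0','1'].isPrefixOf r && !PySem.Chars.strIsdigit ((r.drop 2).take 1)))) := by
  rcases r with _ | ⟨a, r⟩
  · simp [pvDigitScan, List.isPrefixOf]
  by_cases da : PySem.Chars.isdigit a = true
  case neg =>
    have h0 : ¬ ('0' = a) := fun h => da (h ▸ (show PySem.Chars.isdigit '0' = true by decide))
    have h1 : ¬ ('1' = a) := fun h => da (h ▸ (show PySem.Chars.isdigit '1' = true by decide))
    simp [pvDigitScan, da, List.isPrefixOf, h0, h1]
  by_cases ha0 : a = '0'
  · subst ha0
    rcases r with _ | ⟨b, r⟩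
    · simp [pvDigitScan, da, List.isPrefixOf, PySem.Chars.strIsdigit]
    by_cases db : PySem.Chars.isdigit b = true
    case neg =>
      have h0 : ¬ ('0' = b) := fun h => db (h ▸ (show PySem.Chars.isdigit '0' = true by decide))
      have h1 : ¬ ('1' = b) := fun h => db (h ▸ (show PySem.Chars.isdigit '1' = true by decide))
      simp [pvDigitScan, da, db, List.isPrefixOf, PySem.Chars.strIsdigit]
    by_cases hb0 : b = '0'
    · subst hb0
      have := pv_stop r
      simp [pvDigitScan, da, List.isPrefixOf, PySem.Chars.strIsdigit] at this ⊢
      exact this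
    by_cases hb1 : b = '1'
    · subst hb1
      have := pv_stop r
      simp [pvDigitScan, da, db, List.isPrefixOf, PySem.Chars.strIsdigit] at this ⊢
      exact this
    · have h0 : ¬ ('0' = b) := fun h => hb0 h.symm
      have h1 : ¬ ('1' = b) := fun h => hb1 h.symm
      simp [pvDigitScan, da, db, List.isPrefixOf, PySem.Chars.strIsdigit, h0, h1,
        (by simp [beq_eq_false_iff_ne]; exact hb0 : (b == '0') = false),
        (by simp [beq_eq_false_iff_ne]; exact hb1 : (b == '1') = false)]
  by_cases ha1 : a = '1'
  · subst ha1
    have := pv_stop r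
    simp [pvDigitScan, da, List.isPrefixOf, PySem.Chars.strIsdigit] at this ⊢
    exact this
  · have h0 : ¬ ('0' = a) := fun h => ha0 h.symm
    have h1 : ¬ ('1' = a) := fun h => ha1 h.symm
    simp [pvDigitScan, da, List.isPrefixOf, h0, h1,
      (by simp [beq_eq_false_iff_ne]; exact ha0 : (a == '0') = false),
      (by simp [beq_eq_false_iff_ne]; exact ha1 : (a == '1') = false)]

-- both sides as functions of the normalised character list
lemma pv_core (t : List Char) :
    (if !(PySem.Chars.startswith t ['G']) then false
     else
       let gword : List Char := t.take (1 + pvDigitScan t.tail)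
       (gword == "G0".toList || gword == "G00".toList ||
        gword == "G1".toList || gword == "G01".toList)) =
    [['0'], ['0', '0'], ['1'], ['0', '1']].any (pvAltHit t) := by
  rcases t with _ | ⟨g, r⟩
  · simp [PySem.Chars.startswith, pvAltHit, List.isPrefixOf]
  by_cases hg : g = 'G'
  case neg =>
    have hgf : ('G' == g) = false := by simp [beq_eq_false_iff_ne]; exact fun h => hg h.symm
    simp [PySem.Chars.startswith, pvAltHit, List.isPrefixOf, hgf]
  subst hg
  have := pv_inner r
  simp only [pvAltHit, PySem.Chars.startswith, List.any_cons, List.any_nil] at *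
  simp [pysem, List.isPrefixOf, Nat.add_comm 1 (pvDigitScan r), this]

-- ===== VERDICT (by name: the statement is the Claim_ definition above) =====
theorem line_requires_motion_sync_py_spec : Claim_equal_line_requires_motion_sync_py := by
  intro line _
  unfold Spec_line_requires_motion_sync_py line_requires_motion_sync_py line_requires_motion_sync_py_alt
  exact pv_core _
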